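-- pv_equiv track=rewrite | github.com/Atum555/College | FP/MT1/exercise5_a.py | middle_square
-- ===== SOURCE A (Python) =====
-- def middle_square(number:int, digits:int, iterations:int) -> int:
--     for _ in range(iterations):
--         number **= 2
--         numberL = [x for x in str(number)]
--         while len(numberL) < digits*2:
--             numberL.insert(0,"0")
--         number = 0
--         for i in range(int(digits*0.5), int(digits*1.5)):
--             number *= 10
--             number += int(numberL[i])
--     return number
-- ===== SOURCE B (Python) =====
-- def middle_square(number: int, digits: int, iterations: int) -> int:
--     # Purely arithmetic middle-square step: no string conversion, no list padding.
--     if iterations <= 0: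
--         return number
--     if digits <= 0:
--         return 0                       # the middle slice is empty, every iteration yields 0
--     hi = digits + digits // 2          # end of the middle slice (= int(digits*1.5))
--     mod = 10 ** digits                 # the slice is exactly `digits` wide
--     for _ in range(iterations):
--         sq = number * number
--         # L = length of the zero-padded decimal string of sq (at least 2*digits)
--         L = 2 * digits
--         t = sq // 10 ** L
--         while t > 0:
--             t //= 10
--             L += 1
--         number = (sq // 10 ** (L - hi)) % mod
--     return number
-- ===== Notes on version B (the rewrite author's own statement) =====
-- stated objective: faster
-- what changed: B replaces A's per-iteration str() conversion, list building, insert(0,'0') padding loop and per-character int() accumulation by pure integer arithmetic: the middle digits are extracted with one division and one modulus (plus a small division loop that only counts the digits of the square beyond 2*digits), with the slice bounds precomputed once outside the loop.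
import Mathlib
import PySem

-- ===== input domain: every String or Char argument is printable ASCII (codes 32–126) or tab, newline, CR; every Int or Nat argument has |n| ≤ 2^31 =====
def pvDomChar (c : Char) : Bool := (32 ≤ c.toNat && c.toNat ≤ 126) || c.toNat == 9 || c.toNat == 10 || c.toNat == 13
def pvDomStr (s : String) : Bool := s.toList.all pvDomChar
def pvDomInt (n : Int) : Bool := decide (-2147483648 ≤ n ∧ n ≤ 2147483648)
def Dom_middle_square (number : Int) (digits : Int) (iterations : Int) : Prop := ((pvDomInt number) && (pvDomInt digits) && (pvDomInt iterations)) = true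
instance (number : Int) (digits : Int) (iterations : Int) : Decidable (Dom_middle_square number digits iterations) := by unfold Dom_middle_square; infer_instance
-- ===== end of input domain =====

-- B replaces A's string/list middle-digit extraction by pure div/mod arithmetic (same outer loop, no string conversion).

-- ===== PORT A =====
-- while len(numberL) < digits*2: numberL.insert(0,"0")
def pvPadA (target : Int) (l : List Char) : List Char :=
  if (l.length : Int) < target then pvPadA target ('0' :: l) else l
termination_by (target - l.length).toNat
decreasing_by simp; omega

-- int(numberL[i]); never none on the data A reaches (index in range, digit characters only)
def pvDigitAt (l : List Char) (i : Int) : Int :=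
  (PySem.Int.ofChars? [PySem.List.pyGetD l i ' ']).getD 0

-- one body of A's outer loop; int(digits*0.5) = truncdiv digits 2 and int(digits*1.5) = truncdiv (digits*3) 2
-- exactly (the float products are exact for |digits| ≤ 2^31, int() truncates toward zero)
def pvStepA (digits : Int) (n : Int) : Int :=
  let sq := n ^ 2
  let numberL := pvPadA (digits * 2) (PySem.Int.toChars sq)
  (PySem.List.pyRange (PySem.Int.truncdiv digits 2) (PySem.Int.truncdiv (digits * 3) 2) 1).foldl
    (fun acc i => acc * 10 + pvDigitAt numberL i) 0

def middle_square (number : Int) (digits : Int) (iterations : Int) : Int :=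
  (PySem.List.pyRange 0 iterations 1).foldl (fun acc _ => pvStepA digits acc) number

-- ===== PORT B =====
-- while t > 0: t //= 10; L += 1
def pvLenLoop (t : Int) (L : Int) : Int :=
  if 0 < t then pvLenLoop (PySem.Int.floordiv t 10) (L + 1) else L
termination_by t.toNat
decreasing_by rw [PySem.Int.floordiv_eq_ediv_of_pos (by omega : (0:Int) < 10)]; omega

-- one body of B's loop (hi and md are loop-invariant; the 10** exponents are ≥ 0 here, so .toNat is exact)
def pvStepB (digits hi md : Int) (n : Int) : Int :=
  let sq := n * n
  let L := pvLenLoop (PySem.Int.floordiv sq ((10:Int) ^ (2*digits).toNat)) (2*digits)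
  PySem.Int.mod (PySem.Int.floordiv sq ((10:Int) ^ (L - hi).toNat)) md

def middle_square_alt (number : Int) (digits : Int) (iterations : Int) : Int :=
  if iterations ≤ 0 then number
  else if digits ≤ 0 then 0
  else
    let hi := digits + PySem.Int.floordiv digits 2
    let md := (10:Int) ^ digits.toNat
    (PySem.List.pyRange 0 iterations 1).foldl (fun n _ => pvStepB digits hi md n) number

-- ===== PRECONDITION & SPEC =====
def Spec_middle_square (number : Int) (digits : Int) (iterations : Int) (out : Int) : Prop := out = middle_square_alt number digits iterations
instance (number : Int) (digits : Int) (iterations : Int) (out : Int) : Decidable (Spec_middle_square number digits iterations out) := by unfold Spec_middle_square; infer_instance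

-- ===== CLAIM (what is proved, stated in full; the proofs are below) =====
def Claim_equal_middle_square : Prop := ∀ (number : Int) (digits : Int) (iterations : Int), Dom_middle_square number digits iterations → Spec_middle_square number digits iterations (middle_square number digits iterations)

-- ===== LEMMAS AND PROOFS =====

-- big-endian digit list of m (with the one '0' Python prints for 0) and its value
def pvD0 (m : ℕ) : List ℕ := if m = 0 then [0] else (Nat.digits 10 m).reverse
def pvValD (ds : List ℕ) : ℕ := ds.foldl (fun a x => 10 * a + x) 0

lemma pvPadA_eq (t : Int) (l : List Char) :
    pvPadA t l = List.replicate (t - (l.length : Int)).toNat '0' ++ l := by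
  fun_induction pvPadA t l with
  | case1 l h ih =>
    rw [ih]
    have h1 : (t - ((('0'::l):List Char).length : Int)).toNat + 1 = (t - (l.length : Int)).toNat := by
      simp; omega
    rw [← h1, List.replicate_succ', List.append_assoc]
    simp
  | case2 l h =>
    have : (t - (l.length : Int)).toNat = 0 := by omega
    simp [this]

lemma pvToDigitsCore_eq (f : ℕ) : ∀ (n : ℕ) (l : List Char), n < f →
    Nat.toDigitsCore 10 f n l = (pvD0 n).map Nat.digitChar ++ l := by
  induction f with
  | zero => intro n l h; omega
  | succ f ih =>
    intro n l h
    simp only [Nat.toDigitsCore]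
    by_cases h10 : n / 10 = 0
    · simp only [h10]
      by_cases hn : n = 0
      · subst hn; simp [pvD0]
      · have hlt : n < 10 := by omega
        have : Nat.digits 10 n = [n] := by
          rw [Nat.digits_def' (by norm_num) (by omega), h10]
          simp [Nat.mod_eq_of_lt hlt]
        simp [pvD0, hn, this, Nat.mod_eq_of_lt hlt]
    · simp only [h10]
      rw [ih (n / 10) _ (by omega)]
      have hn : n ≠ 0 := by omega
      have hd : Nat.digits 10 n = n % 10 :: Nat.digits 10 (n / 10) :=
        Nat.digits_def' (by norm_num) (by omega)
      simp [pvD0, hn, h10, hd, List.map_append]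

lemma pvToDigits_eq (m : ℕ) : Nat.toDigits 10 m = (pvD0 m).map Nat.digitChar := by
  have := pvToDigitsCore_eq (m + 1) m [] (by omega)
  simpa [Nat.toDigits] using this

lemma pvLenLoop_eq (t L : Int) (ht : 0 ≤ t) :
    pvLenLoop t L = L + ((Nat.digits 10 t.toNat).length : Int) := by
  fun_induction pvLenLoop t L with
  | case1 t L h ih =>
    have h10 : PySem.Int.floordiv t 10 = ((t.toNat / 10 : ℕ) : Int) := by
      rw [PySem.Int.floordiv_eq_ediv_of_pos (by omega : (0:Int) < 10)]
      omega
    rw [ih (by rw [h10]; exact Int.natCast_nonneg _)]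
    have hq : (PySem.Int.floordiv t 10).toNat = t.toNat / 10 := by
      rw [PySem.Int.floordiv_eq_ediv_of_pos (by omega : (0:Int) < 10)]; omega
    have hd : Nat.digits 10 t.toNat = t.toNat % 10 :: Nat.digits 10 (t.toNat / 10) :=
      Nat.digits_def' (by norm_num) (by omega)
    rw [hq, hd]
    simp
    omega
  | case2 t L h =>
    have : t.toNat = 0 := by omega
    simp [this]

lemma pvValD_go (ds : List ℕ) : ∀ (a : ℕ),
    ds.foldl (fun a x => 10 * a + x) a = a * 10 ^ ds.length + pvValD ds := by
  induction ds with
  | nil => intro a; simp [pvValD]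
  | cons x xs ih =>
    intro a
    have h2 : pvValD (x :: xs) = x * 10 ^ xs.length + pvValD xs := by
      rw [pvValD, List.foldl_cons, ih]; norm_num
    simp only [List.foldl_cons, List.length_cons, ih, h2]
    ring_nf

lemma pvValD_append (xs ys : List ℕ) :
    pvValD (xs ++ ys) = pvValD xs * 10 ^ ys.length + pvValD ys := by
  rw [pvValD, List.foldl_append, ← pvValD, pvValD_go]

lemma pvValD_lt (ds : List ℕ) (h : ∀ x ∈ ds, x < 10) : pvValD ds < 10 ^ ds.length := by
  induction ds with
  | nil => simp [pvValD]
  | cons x xs ih =>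
    have hx : x < 10 := h x (by simp)
    have h2 : pvValD (x :: xs) = x * 10 ^ xs.length + pvValD xs := by
      rw [pvValD, List.foldl_cons, pvValD_go]; norm_num
    have h3 := ih (fun y hy => h y (by simp [hy]))
    have h4 : (x + 1) * 10 ^ xs.length ≤ 10 * 10 ^ xs.length :=
      Nat.mul_le_mul_right _ (by omega)
    simp only [List.length_cons, pow_succ]
    nlinarith

lemma pvValD_replicate_zero (p : ℕ) : pvValD (List.replicate p 0) = 0 := by
  induction p with
  | zero => simp [pvValD]
  | succ p ih =>
    rw [List.replicate_succ', pvValD_append, ih]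
    simp [pvValD]

lemma pvValD_digits (m : ℕ) : pvValD ((Nat.digits 10 m).reverse) = m := by
  induction m using Nat.strong_induction_on with
  | _ m ih =>
    by_cases hm : m = 0
    · subst hm; simp [pvValD]
    · rw [Nat.digits_def' (by norm_num : (1:ℕ) < 10) (by omega), List.reverse_cons,
        pvValD_append, ih (m / 10) (Nat.div_lt_self (by omega) (by norm_num))]
      have : pvValD [m % 10] = m % 10 := by simp [pvValD]
      simp only [this, List.length_singleton, pow_one]
      omega

lemma pvValD_D0 (m : ℕ) : pvValD (pvD0 m) = m := by
  by_cases h : m = 0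
  · rw [pvD0, if_pos h, h]; decide
  · rw [pvD0, if_neg h]; exact pvValD_digits m

lemma pvD0_lt (m : ℕ) : ∀ x ∈ pvD0 m, x < 10 := by
  intro x hx
  by_cases h : m = 0
  · simp [pvD0, h] at hx; omega
  · simp [pvD0, h] at hx
    exact Nat.digits_lt_base (by norm_num) hx

lemma pvValD_drop (ds : List ℕ) (j : ℕ) (h : ∀ x ∈ ds, x < 10) :
    pvValD (ds.drop j) = pvValD ds % 10 ^ (ds.length - j) := by
  have hsplit : ds = ds.take j ++ ds.drop j := (List.take_append_drop j ds).symm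
  have hlen : (ds.drop j).length = ds.length - j := List.length_drop ..
  have hlt : pvValD (ds.drop j) < 10 ^ (ds.length - j) := by
    rw [← hlen]; exact pvValD_lt _ (fun x hx => h x (List.mem_of_mem_drop hx))
  conv_rhs => rw [hsplit]
  rw [pvValD_append, hlen, List.take_append_drop, Nat.mul_add_mod', Nat.mod_eq_of_lt hlt]

lemma pvValD_take (ds : List ℕ) (j : ℕ) (h : ∀ x ∈ ds, x < 10) :
    pvValD (ds.take j) = pvValD ds / 10 ^ (ds.length - j) := by
  have hsplit : ds = ds.take j ++ ds.drop j := (List.take_append_drop j ds).symm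
  have hlen : (ds.drop j).length = ds.length - j := List.length_drop ..
  have hlt : pvValD (ds.drop j) < 10 ^ (ds.length - j) := by
    rw [← hlen]; exact pvValD_lt _ (fun x hx => h x (List.mem_of_mem_drop hx))
  conv_rhs => rw [hsplit]
  rw [pvValD_append, hlen, List.take_append_drop, Nat.mul_comm,
    Nat.mul_add_div (by positivity), Nat.div_eq_of_lt hlt, Nat.add_zero]

lemma pvDigits_div_pow_len (m : ℕ) : ∀ k, (Nat.digits 10 (m / 10 ^ k)).length = (Nat.digits 10 m).length - k := by
  induction m using Nat.strong_induction_on with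
  | _ m ih =>
    intro k
    cases k with
    | zero => simp
    | succ k =>
      by_cases hm : m = 0
      · simp [hm]
      · have hd : Nat.digits 10 m = m % 10 :: Nat.digits 10 (m / 10) :=
          Nat.digits_def' (by norm_num) (by omega)
        have hdiv : m / 10 ^ (k + 1) = (m / 10) / 10 ^ k := by
          rw [Nat.div_div_eq_div_mul, pow_succ']
        rw [hdiv, ih (m / 10) (Nat.div_lt_self (by omega) (by norm_num)) k, hd]
        simp

-- range indexing turned into a sublist
lemma pvRange_map_getD (P : List Char) (lo hi : Int) (h0 : 0 ≤ lo) (_hle : lo ≤ hi)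
    (hhi : hi ≤ (P.length : Int)) :
    (PySem.List.pyRange lo hi 1).map (fun i => PySem.List.pyGetD P i ' ') =
      (P.drop lo.toNat).take (hi - lo).toNat := by
  apply List.ext_getElem
  · simp [PySem.List.length_pyRange_one]
    omega
  · intro k hk1 hk2
    simp only [List.getElem_map, PySem.List.getElem_pyRange_one]
    rw [PySem.List.pyGetD_eq_getElem P ' ' (by omega)
      (by simp [PySem.List.length_pyRange_one] at hk1; omega)]
    simp [PySem.List.length_pyRange_one] at hk1
    rw [List.getElem_take, List.getElem_drop]
    congr 1
    omega

lemma pvDigitChar_decode (x : ℕ) (h : x < 10) :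
    (PySem.Int.ofChars? [Nat.digitChar x]).getD 0 = (x : Int) := by
  interval_cases x <;> decide

lemma pvFoldInt (ds : List ℕ) (h : ∀ x ∈ ds, x < 10) : ∀ (a : ℕ),
    ds.foldl (fun (acc : Int) x => acc * 10 + (PySem.Int.ofChars? [Nat.digitChar x]).getD 0) (a : Int) =
      ((ds.foldl (fun a x => 10 * a + x) a : ℕ) : Int) := by
  induction ds with
  | nil => intro a; simp
  | cons x xs ih =>
    intro a
    have hx := h x (by simp)
    simp only [List.foldl_cons, pvDigitChar_decode x hx]
    rw [show (a : Int) * 10 + (x : Int) = ((10 * a + x : ℕ) : Int) by push_cast; ring]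
    exact ih (fun y hy => h y (by simp [hy])) _

lemma pvFoldRange (P : List Char) (lo hi : Int) (g : Int → Char → Int) (h0 : 0 ≤ lo)
    (hle : lo ≤ hi) (hhi : hi ≤ (P.length : Int)) (a : Int) :
    (PySem.List.pyRange lo hi 1).foldl (fun acc i => g acc (PySem.List.pyGetD P i ' ')) a =
      ((P.drop lo.toNat).take (hi - lo).toNat).foldl g a := by
  rw [← pvRange_map_getD P lo hi h0 hle hhi, List.foldl_map]

-- the per-iteration bodies agree for digits > 0
lemma pvStep_eq (d : Int) (hd : 0 < d) (n : Int) :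
    pvStepA d n = pvStepB d (d + PySem.Int.floordiv d 2) ((10:Int) ^ d.toNat) n := by
  obtain ⟨k, rfl⟩ : ∃ k : ℕ, d = (k : Int) := ⟨d.toNat, by omega⟩
  have hk : 1 ≤ k := by omega
  set M : ℕ := (n ^ 2).toNat with hM
  have hsq : n ^ 2 = (M : Int) := (Int.toNat_of_nonneg (sq_nonneg n)).symm
  have hnn : n * n = (M : Int) := by rw [← hsq]; ring
  set lenM : ℕ := (Nat.digits 10 M).length with hlenM
  set L0 : ℕ := (pvD0 M).length with hL0
  set p : ℕ := ((k : Int) * 2 - (L0 : Int)).toNat with hp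
  set D : List ℕ := List.replicate p 0 ++ pvD0 M with hD
  have hD10 : ∀ x ∈ D, x < 10 := by
    intro x hx
    rw [hD] at hx
    rcases List.mem_append.1 hx with h | h
    · have := List.eq_of_mem_replicate h; omega
    · exact pvD0_lt M x h
  have hval : pvValD D = M := by
    rw [hD, pvValD_append, pvValD_replicate_zero, pvValD_D0]; ring
  set L : ℕ := D.length with hL
  have hLpL0 : L = p + L0 := by simp [hL, hD, hL0]
  have hM0 : M = 0 → L0 = 1 ∧ lenM = 0 := by
    intro h; constructor
    · simp [hL0, pvD0, h]
    · simp [hlenM, h]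
  have hM1 : M ≠ 0 → L0 = lenM := by
    intro h; simp [hL0, pvD0, h, hlenM]
  have hltM : M < 10 ^ lenM := Nat.lt_base_pow_length_digits (by norm_num)
  have hLeq : L = 2 * k + (lenM - 2 * k) := by
    by_cases hc : lenM ≤ 2 * k
    · have h1 : M < 10 ^ (2 * k) :=
        lt_of_lt_of_le hltM (Nat.pow_le_pow_right (by norm_num) hc)
      by_cases hm : M = 0
      · have := hM0 hm; omega
      · have := hM1 hm; omega
    · have h2 : M ≠ 0 := by
        intro hm; have := hM0 hm; omega
      have := hM1 h2; omega
  have hL2k : 2 * k ≤ L := by omega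
  -- A's slice indices
  have hlo : PySem.Int.truncdiv (k : Int) 2 = ((k / 2 : ℕ) : Int) := by
    show ((k : Int)).tdiv 2 = _
    rw [Int.tdiv_eq_ediv_of_nonneg (Int.natCast_nonneg _)]; omega
  have hhi : PySem.Int.truncdiv ((k : Int) * 3) 2 = ((k + k / 2 : ℕ) : Int) := by
    show ((k : Int) * 3).tdiv 2 = _
    rw [show (k : Int) * 3 = ((3 * k : ℕ) : Int) by push_cast; ring,
      Int.tdiv_eq_ediv_of_nonneg (Int.natCast_nonneg _)]
    omega
  -- A's padded character list is D rendered as digit characters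
  have hP : pvPadA ((k : Int) * 2) (PySem.Int.toChars (n ^ 2)) = D.map Nat.digitChar := by
    rw [hsq]
    have htc : PySem.Int.toChars ((M : ℕ) : Int) = (pvD0 M).map Nat.digitChar := by
      simp [PySem.Int.toChars, pvToDigits_eq]
    rw [htc, pvPadA_eq, hD, List.map_append, List.map_replicate]
    congr 2
    simp [← hL0, hp]
  -- evaluate A's step to a value of the digit list
  have hA : pvStepA (k : Int) n = ((pvValD ((D.drop (k / 2)).take k) : ℕ) : Int) := by
    simp only [pvStepA, pvDigitAt, hlo, hhi, hP]
    rw [pvFoldRange (D.map Nat.digitChar) _ _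
      (fun acc c => acc * 10 + (PySem.Int.ofChars? [c]).getD 0)
      (Int.natCast_nonneg _) (by exact_mod_cast Nat.le_add_left (k/2) k)
      (by simp [List.length_map, ← hL]; omega)]
    have ht1 : (((k / 2 : ℕ) : Int)).toNat = k / 2 := by omega
    have ht2 : (((k + k / 2 : ℕ) : Int) - ((k / 2 : ℕ) : Int)).toNat = k := by omega
    rw [ht1, ht2, ← List.map_drop, ← List.map_take, List.foldl_map]
    have := pvFoldInt ((D.drop (k / 2)).take k)
      (fun x hx => hD10 x (List.mem_of_mem_drop (List.mem_of_mem_take hx))) 0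
    simpa [pvValD] using this
  -- evaluate B's step
  have hfd : PySem.Int.floordiv (k : Int) 2 = ((k / 2 : ℕ) : Int) := by
    rw [PySem.Int.floordiv_eq_ediv_of_pos (by omega : (0:Int) < 2)]; omega
  have h2k : (2 * (k : Int)).toNat = 2 * k := by omega
  have hq1 : PySem.Int.floordiv (n * n) ((10 : Int) ^ (2 * (k : Int)).toNat) =
      ((M / 10 ^ (2 * k) : ℕ) : Int) := by
    rw [hnn, h2k, show (10 : Int) ^ (2 * k) = ((10 ^ (2 * k) : ℕ) : Int) by push_cast; ring,
      PySem.Int.floordiv_natCast]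
  have hLB : pvLenLoop (PySem.Int.floordiv (n * n) ((10 : Int) ^ (2 * (k : Int)).toNat))
      (2 * (k : Int)) = (L : Int) := by
    rw [hq1, pvLenLoop_eq _ _ (Int.natCast_nonneg _)]
    rw [Int.toNat_natCast, pvDigits_div_pow_len, ← hlenM]
    rw [hLeq]; push_cast; ring
  set e : ℕ := L - (k + k / 2) with he
  have hexp : ((L : Int) - ((k : Int) + PySem.Int.floordiv (k : Int) 2)).toNat = e := by
    rw [hfd]; omega
  have hB : pvStepB (k : Int) ((k : Int) + PySem.Int.floordiv (k : Int) 2)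
      ((10 : Int) ^ ((k : Int)).toNat) n = ((M / 10 ^ e % 10 ^ k : ℕ) : Int) := by
    simp only [pvStepB]
    rw [hLB, hexp, hnn,
      show (10 : Int) ^ e = ((10 ^ e : ℕ) : Int) by push_cast; ring,
      PySem.Int.floordiv_natCast,
      show (10 : Int) ^ ((k : Int)).toNat = ((10 ^ k : ℕ) : Int) by rw [Int.toNat_natCast]; push_cast; ring,
      PySem.Int.mod_natCast]
  rw [hA, hB]
  -- the remaining fact is pure arithmetic on ℕ
  have hD10' : ∀ x ∈ D.drop (k / 2), x < 10 := fun x hx => hD10 x (List.mem_of_mem_drop hx)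
  have h1 : pvValD (D.drop (k / 2)) = M % 10 ^ (L - k / 2) := by
    rw [pvValD_drop _ _ hD10, hval, hL]
  have hlen' : (D.drop (k / 2)).length = L - k / 2 := by rw [List.length_drop, hL]
  have h2 : pvValD ((D.drop (k / 2)).take k) = M % 10 ^ (L - k / 2) / 10 ^ ((L - k / 2) - k) := by
    rw [pvValD_take _ _ hD10', h1, hlen']
  have e2 : (L - k / 2) - k = e := by omega
  have e3 : (10 : ℕ) ^ (L - k / 2) = 10 ^ e * 10 ^ k := by
    rw [← pow_add]; congr 1; omega
  rw [h2, e2, e3, Nat.mod_mul_right_div_self]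

-- A's body returns 0 when digits ≤ 0 (empty middle slice)
lemma pvStepA_nonpos (d : Int) (hd : d ≤ 0) (n : Int) : pvStepA d n = 0 := by
  have hle : PySem.Int.truncdiv (d * 3) 2 ≤ PySem.Int.truncdiv d 2 := by
    obtain ⟨m, rfl⟩ : ∃ m : ℕ, d = -(m : Int) := ⟨(-d).toNat, by omega⟩
    have h1 : PySem.Int.truncdiv (-(m : Int)) 2 = -(((m / 2 : ℕ)) : Int) := by
      show (-(m : Int)).tdiv 2 = _
      rw [Int.neg_tdiv, Int.tdiv_eq_ediv_of_nonneg (Int.natCast_nonneg _)]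
      omega
    have h2 : PySem.Int.truncdiv (-(m : Int) * 3) 2 = -(((3 * m / 2 : ℕ)) : Int) := by
      show (-(m : Int) * 3).tdiv 2 = _
      rw [show -(m : Int) * 3 = -((3 * m : ℕ) : Int) by push_cast; ring,
        Int.neg_tdiv, Int.tdiv_eq_ediv_of_nonneg (Int.natCast_nonneg _)]
      omega
    rw [h1, h2]
    have : m / 2 ≤ 3 * m / 2 := Nat.div_le_div_right (by omega)
    omega
  simp only [pvStepA]
  rw [PySem.List.pyRange_one_eq_nil hle]
  rfl

lemma pvFoldZero (l : List Int) (f : Int → Int) (hf : ∀ x, f x = 0) :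
    ∀ (a : Int), l ≠ [] → l.foldl (fun acc _ => f acc) a = 0 := by
  induction l with
  | nil => intro a h; exact absurd rfl h
  | cons x xs ih =>
    intro a _
    cases xs with
    | nil => simp [hf]
    | cons y ys =>
      simp only [List.foldl_cons]
      exact ih _ (by simp)

-- ===== VERDICT (by name: the statement is the Claim_ definition above) =====
theorem middle_square_spec : Claim_equal_middle_square := by
  intro number digits iterations _
  unfold Spec_middle_square middle_square middle_square_alt
  by_cases hit : iterations ≤ 0
  · rw [PySem.List.pyRange_one_eq_nil (by omega)]
    simp [hit]
  · simp only [hit, if_false]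
    by_cases hd : digits ≤ 0
    · simp only [hd, if_true]
      exact pvFoldZero _ _ (pvStepA_nonpos digits hd) number
        (by rw [PySem.List.pyRange_one_cons (by omega)]; simp)
    · simp only [hd, if_false]
      have : (fun acc _ => pvStepA digits acc) =
          (fun (n : Int) (_ : Int) => pvStepB digits (digits + PySem.Int.floordiv digits 2) ((10:Int) ^ digits.toNat) n) := by
        funext acc i
        exact pvStep_eq digits (by omega) acc
      rw [this]
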